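-- pv_equiv track=rewrite | github.com/Opty-BSc/PF | Project_2/PalavraGuruMP.py | conjuntos_palavras_iguais
-- ===== SOURCE A (Python) =====
-- def palavras_potenciais_iguais(palavra_potencial_1, palavra_potencial_2):
-- 	"""
-- 		:Descricao palavras_potenciais_iguais: Dadas 2 palavras potenciais devolve um booleano associado a igualdade \
-- 		das strings que representam as palavras
--
-- 	:param palavra_potencial_1: Tuplo que representa uma palavra potencial
-- 	:param palavra_potencial_2: Tuplo que representa a outra palavra potencial
-- 	:return: Booleano
-- 	"""
-- 	return palavra_potencial_para_cadeia(palavra_potencial_1) == palavra_potencial_para_cadeia(palavra_potencial_2)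
--
-- def palavra_potencial_para_cadeia(palavra_potencial):
-- 	"""
-- 		:Descricao palavra_potencial_para_cadeia: Dada uma palavra potencial devolve a sua string associada
--
-- 	:param palavra_potencial: Tuplo que representa a palavra potencial
-- 	:return: String que representa a palavra
-- 	"""
-- 	return palavra_potencial[0]
--
-- def numero_palavras(conjunto_palavras):
-- 	"""
-- 		:Descricao numero_palavras: Dado um conjunto de palavras devolve o seu tamanho
--
-- 	:param conjunto_palavras: Lista associada ao conjunto de palavras
-- 	:return: Inteiro
-- 	"""
-- 	return len(conjunto_palavras)
--
-- def conjuntos_palavras_iguais(conjunto_palavras_1, conjunto_palavras_2):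
-- 	"""
-- 		:Descricao conjuntos_palavras_iguais: Dados 2 conjuntos de palavras devolve um booleano associado a igualdade \
-- 		de todos os elementos dos conjuntos de palavras
--
-- 	:param conjunto_palavras_1: Lista associada a um conjunto de palavras
-- 	:param conjunto_palavras_2: Lista associada a outro conjunto de palavras
-- 	:return: Booleano
-- 	"""
-- 	if numero_palavras(conjunto_palavras_1) == 0 and numero_palavras(conjunto_palavras_2) == 0: return True
--
-- 	if numero_palavras(conjunto_palavras_1) == 0 or numero_palavras(conjunto_palavras_2) == 0: return False
--
-- 	for ind in range(numero_palavras(conjunto_palavras_2)):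
--
-- 		if palavras_potenciais_iguais(conjunto_palavras_1[0], conjunto_palavras_2[ind]):
--
-- 			return conjuntos_palavras_iguais(conjunto_palavras_1[1:], conjunto_palavras_2[:ind] + \
-- 			conjunto_palavras_2[ind+1:])
--
-- 	return False
-- ===== SOURCE B (Python) =====
-- def conjuntos_palavras_iguais(conjunto_palavras_1, conjunto_palavras_2):
--     return sorted(p[0] for p in conjunto_palavras_1) == \
--         sorted(p[0] for p in conjunto_palavras_2)
-- ===== Notes on version B (the rewrite author's own statement) =====
-- stated objective: simpler
-- what changed: Replaces A's recursive scan-and-remove multiset comparison (an inner index loop plus list slicing at each recursion step) with a single sort of each list's first components followed by one equality comparison.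
-- outside the precondition, e.g. on conjuntos_palavras_iguais([], [()]): A returns False, B raises IndexError
import Mathlib
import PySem

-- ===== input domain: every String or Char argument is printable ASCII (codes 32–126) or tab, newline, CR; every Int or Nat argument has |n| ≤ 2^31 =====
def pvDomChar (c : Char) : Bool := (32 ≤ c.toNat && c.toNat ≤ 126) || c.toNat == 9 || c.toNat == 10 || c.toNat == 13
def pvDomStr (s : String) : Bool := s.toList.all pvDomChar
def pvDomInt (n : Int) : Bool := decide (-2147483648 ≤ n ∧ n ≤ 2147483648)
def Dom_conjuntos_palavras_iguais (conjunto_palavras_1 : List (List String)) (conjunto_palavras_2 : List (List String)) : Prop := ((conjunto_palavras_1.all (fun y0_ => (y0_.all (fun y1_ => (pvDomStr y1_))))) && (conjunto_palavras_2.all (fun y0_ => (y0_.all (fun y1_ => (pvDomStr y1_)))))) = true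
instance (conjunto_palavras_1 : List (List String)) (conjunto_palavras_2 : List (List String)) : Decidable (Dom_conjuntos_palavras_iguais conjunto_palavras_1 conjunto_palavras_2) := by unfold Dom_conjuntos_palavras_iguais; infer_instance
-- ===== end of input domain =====

-- B replaces A's recursive scan-and-remove with "sort both first-component lists, compare once" (simpler).

-- ===== PORT A =====
-- Inner 'for ind in range(numero_palavras(conjunto_palavras_2))' loop of A: scans c2 left to right
-- for the first word whose string form (palavra_potencial[0], here .headI — elements are nonempty by Pre_)
-- equals w, and returns 'some (c2[:ind] + c2[ind+1:])' (the remainder A recurses on), or none if the loop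
-- falls through (A then returns False).
def pvScanRemove (w : String) : List (List String) → Option (List (List String))
  | [] => none
  | y :: ys => if y.headI = w then some ys else (pvScanRemove w ys).map (y :: ·)

def conjuntos_palavras_iguais (conjunto_palavras_1 : List (List String)) (conjunto_palavras_2 : List (List String)) : Bool :=
  match conjunto_palavras_1, conjunto_palavras_2 with
  | [], [] => true                 -- both empty -> True
  | [], _ :: _ => false            -- exactly one empty -> False
  | _ :: _, [] => false
  | x :: xs, y :: ys =>            -- scan c2 for c1[0]; on a hit recurse on c1[1:] and c2 minus that word
    match pvScanRemove x.headI (y :: ys) with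
    | some rest => conjuntos_palavras_iguais xs rest
    | none => false

-- ===== PORT B =====
def conjuntos_palavras_iguais_alt (conjunto_palavras_1 : List (List String)) (conjunto_palavras_2 : List (List String)) : Bool :=
  PySem.List.sorted (conjunto_palavras_1.map (fun p => p.headI)) (fun x => x) false
    = PySem.List.sorted (conjunto_palavras_2.map (fun p => p.headI)) (fun x => x) false

-- ===== PRECONDITION & SPEC =====
-- Pre_ excludes inputs containing an empty word (inner list): there the Python A raises IndexError on
-- palavra_potencial[0] as soon as that word is reached — except for a few early-return corners (one side
-- empty) where A still returns False but B's sorted(p[0] for p in …) itself raises IndexError.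
def Pre_conjuntos_palavras_iguais (conjunto_palavras_1 : List (List String)) (conjunto_palavras_2 : List (List String)) : Prop :=
  (∀ p ∈ conjunto_palavras_1, p ≠ []) ∧ (∀ p ∈ conjunto_palavras_2, p ≠ [])
instance (conjunto_palavras_1 : List (List String)) (conjunto_palavras_2 : List (List String)) : Decidable (Pre_conjuntos_palavras_iguais conjunto_palavras_1 conjunto_palavras_2) := by unfold Pre_conjuntos_palavras_iguais; infer_instance

def pvWitness_conjuntos_palavras_iguais : List (List String) × List (List String) := ([["ab"], ["c"]], [["c"], ["ab"]])

def Spec_conjuntos_palavras_iguais (conjunto_palavras_1 : List (List String)) (conjunto_palavras_2 : List (List String)) (out : Bool) : Prop := out = conjuntos_palavras_iguais_alt conjunto_palavras_1 conjunto_palavras_2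
instance (conjunto_palavras_1 : List (List String)) (conjunto_palavras_2 : List (List String)) (out : Bool) : Decidable (Spec_conjuntos_palavras_iguais conjunto_palavras_1 conjunto_palavras_2 out) := by unfold Spec_conjuntos_palavras_iguais; infer_instance

-- ===== CLAIM (what is proved, stated in full; the proofs are below) =====
def Claim_equal_conjuntos_palavras_iguais : Prop := ∀ (conjunto_palavras_1 : List (List String)) (conjunto_palavras_2 : List (List String)), Dom_conjuntos_palavras_iguais conjunto_palavras_1 conjunto_palavras_2 → Pre_conjuntos_palavras_iguais conjunto_palavras_1 conjunto_palavras_2 → Spec_conjuntos_palavras_iguais conjunto_palavras_1 conjunto_palavras_2 (conjuntos_palavras_iguais conjunto_palavras_1 conjunto_palavras_2)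

-- ===== LEMMAS AND PROOFS =====

-- pvScanRemove characterised through the list of string forms.
theorem pvScanRemove_none (w : String) (l : List (List String)) (h : pvScanRemove w l = none) :
    w ∉ l.map (fun p => p.headI) := by
  induction l with
  | nil => simp
  | cons y ys ih =>
    simp only [pvScanRemove] at h
    by_cases hy : y.headI = w
    · simp [hy] at h
    · simp [hy] at h
      intro hmem
      rcases List.mem_cons.mp hmem with he | hm
      · exact hy he.symm
      · exact ih h hm

theorem pvScanRemove_some (w : String) (l rest : List (List String)) (h : pvScanRemove w l = some rest) :
    w ∈ l.map (fun p => p.headI) ∧ rest.map (fun p => p.headI) = (l.map (fun p => p.headI)).erase w := by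
  induction l generalizing rest with
  | nil => simp [pvScanRemove] at h
  | cons y ys ih =>
    simp only [pvScanRemove] at h
    by_cases hy : y.headI = w
    · simp [hy] at h
      subst h
      simp [hy]
    · simp [hy] at h
      rcases h with ⟨r', hr', rfl⟩
      rcases ih r' hr' with ⟨hmem, herase⟩
      refine ⟨by simp [hmem], ?_⟩
      simp [List.erase_cons_tail, hy, herase]

-- A decides permutation-equality of the lists of string forms.
theorem conjA_iff_perm (c1 c2 : List (List String)) :
    conjuntos_palavras_iguais c1 c2 = true ↔
      (c1.map (fun p => p.headI)).Perm (c2.map (fun p => p.headI)) := by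
  induction c1 generalizing c2 with
  | nil =>
    cases c2 with
    | nil => simp [conjuntos_palavras_iguais]
    | cons y ys => simp [conjuntos_palavras_iguais, List.nil_perm]
  | cons x xs ih =>
    cases c2 with
    | nil => simp [conjuntos_palavras_iguais, List.perm_nil]
    | cons y ys =>
      simp only [conjuntos_palavras_iguais]
      rcases hscan : pvScanRemove x.headI (y :: ys) with _ | rest
      · have hnm := pvScanRemove_none _ _ hscan
        simp only [List.map_cons] at hnm ⊢
        constructor
        · intro h; exact absurd h (by simp)
        · intro h
          exact ((hnm (h.mem_iff.mp (List.mem_cons_self))).elim)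
      · rcases pvScanRemove_some _ _ _ hscan with ⟨hmem, herase⟩
        rw [ih rest]
        simp only [List.map_cons] at hmem herase ⊢
        rw [List.cons_perm_iff_perm_erase, herase]
        constructor
        · intro h; exact ⟨hmem, h⟩
        · intro h; exact h.2

-- B decides the same predicate.
theorem conjB_iff_perm (c1 c2 : List (List String)) :
    conjuntos_palavras_iguais_alt c1 c2 = true ↔
      (c1.map (fun p => p.headI)).Perm (c2.map (fun p => p.headI)) := by
  unfold conjuntos_palavras_iguais_alt
  rw [decide_eq_true_iff]
  exact PySem.List.sorted_id_eq_sorted_id_iff_perm _ _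

-- ===== VERDICT (by name: the statement is the Claim_ definition above) =====
theorem conjuntos_palavras_iguais_spec : Claim_equal_conjuntos_palavras_iguais := by
  intro c1 c2 _ _
  unfold Spec_conjuntos_palavras_iguais
  rw [Bool.eq_iff_iff, conjA_iff_perm, conjB_iff_perm]
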